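-- pv_equiv track=rewrite | github.com/PLSE-Lab/Python-MLAPI-expl | python_sources/santa-s-workshop-eda-sorting-visualization.py | difficulty
-- ===== SOURCE A (Python) =====
-- def weekday(days):
--     weekday = []
--     for day in days:
--         if day%7==2:
--             weekday.append('Monday')
--         elif day%7==1:
--             weekday.append('Tuesday')
--         elif day%7==0:
--             weekday.append('Wednesday')
--         elif day%7==6:
--             weekday.append('Thursday')
--         elif day%7==5:
--             weekday.append('Friday')
--         elif day%7==4:
--             weekday.append('Saturday')
--         else:
--             weekday.append('Sunday')
--     return weekday
--
-- def difficulty(days):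
--     dif = []
--     for day in days:
--         wd = weekday([day])
--         if day == 1 or day == 2 or day == 3:
--             dif.append(1)
--         elif wd[0]=='Monday' or wd[0]=='Tuesday' or wd[0]=='Wednesday' or wd[0]=='Thursday':
--             dif.append(0)
--         else:
--             dif.append(1)
--     return dif
-- ===== SOURCE B (Python) =====
-- def difficulty(days):
--     # Staged passes: residue test (day-3)%7 < 3 picks out Fri/Sat/Sun residues {3,4,5};
--     # a separate pass marks the opening days 1..3; zip combines with boolean 'or'.
--     weekend = [(day - 3) % 7 < 3 for day in days]
--     opening = [1 <= day <= 3 for day in days]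
--     return [int(w or o) for w, o in zip(weekend, opening)]
-- ===== Notes on version B (the rewrite author's own statement) =====
-- stated objective: alternative
-- what changed: Replaces A's per-element weekday-string helper plus if/elif cascade with three staged passes: one modular-inequality pass ((day-3)%7 < 3), one opening-days pass (1 <= day <= 3), and a zip that ors the two boolean lists.
import Mathlib
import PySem

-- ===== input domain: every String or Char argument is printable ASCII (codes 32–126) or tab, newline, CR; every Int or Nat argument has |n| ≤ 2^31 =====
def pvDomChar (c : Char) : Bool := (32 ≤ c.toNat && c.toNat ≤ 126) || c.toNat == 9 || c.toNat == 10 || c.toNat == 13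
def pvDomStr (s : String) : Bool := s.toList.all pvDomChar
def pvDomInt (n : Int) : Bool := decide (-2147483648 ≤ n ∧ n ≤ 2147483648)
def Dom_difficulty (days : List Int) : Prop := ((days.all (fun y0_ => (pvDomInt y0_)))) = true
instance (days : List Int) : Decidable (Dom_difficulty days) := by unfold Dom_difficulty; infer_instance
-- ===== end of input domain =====

-- B replaces A's weekday-string helper and if/elif cascade by staged boolean passes ((day-3)%7 < 3, 1<=day<=3) combined with 'or' (alternative decomposition; same cost).

-- ===== PORT A =====
-- helper 'weekday' of A, transliterated (foldl = the accumulating for-loop)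
def weekdayA (days : List Int) : List String :=
  days.foldl (fun acc day =>
    if PySem.Int.mod day 7 = 2 then acc ++ ["Monday"]
    else if PySem.Int.mod day 7 = 1 then acc ++ ["Tuesday"]
    else if PySem.Int.mod day 7 = 0 then acc ++ ["Wednesday"]
    else if PySem.Int.mod day 7 = 6 then acc ++ ["Thursday"]
    else if PySem.Int.mod day 7 = 5 then acc ++ ["Friday"]
    else if PySem.Int.mod day 7 = 4 then acc ++ ["Saturday"]
    else acc ++ ["Sunday"]) []

def difficulty (days : List Int) : List Int :=
  days.foldl (fun dif day =>
    let wd := weekdayA [day]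
    if day = 1 ∨ day = 2 ∨ day = 3 then dif ++ [1]
    else if PySem.List.pyGet? wd 0 = some "Monday" ∨ PySem.List.pyGet? wd 0 = some "Tuesday"
         ∨ PySem.List.pyGet? wd 0 = some "Wednesday" ∨ PySem.List.pyGet? wd 0 = some "Thursday" then dif ++ [0]
    else dif ++ [1]) []

-- ===== PORT B =====
def difficulty_alt (days : List Int) : List Int :=
  let weekend := days.map (fun day => decide (PySem.Int.mod (day - 3) 7 < 3))
  let opening := days.map (fun day => decide (1 ≤ day ∧ day ≤ 3))
  (weekend.zip opening).map (fun p => if p.1 || p.2 then (1 : Int) else 0)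

-- ===== PRECONDITION & SPEC =====
def Spec_difficulty (days : List Int) (out : List Int) : Prop := out = difficulty_alt days
instance (days : List Int) (out : List Int) : Decidable (Spec_difficulty days out) := by unfold Spec_difficulty; infer_instance

-- ===== CLAIM (what is proved, stated in full; the proofs are below) =====
def Claim_equal_difficulty : Prop := ∀ (days : List Int), Dom_difficulty days → Spec_difficulty days (difficulty days)

-- ===== LEMMAS AND PROOFS =====

-- B's staged passes collapse to one map (zip of two maps over the same list)
theorem alt_eq_map (days : List Int) :
    difficulty_alt days = days.map (fun day =>
      if (decide (PySem.Int.mod (day - 3) 7 < 3) || decide (1 ≤ day ∧ day ≤ 3)) then (1 : Int) else 0) := by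
  show ((days.map fun day => decide (PySem.Int.mod (day - 3) 7 < 3)).zip
          (days.map fun day => decide (1 ≤ day ∧ day ≤ 3))).map
            (fun p => if p.1 || p.2 then (1 : Int) else 0) = _
  rw [List.zip_map', List.map_map]
  rfl

-- A's loop body equals appending B's per-element value
theorem difficulty_step_eq (acc : List Int) (day : Int) :
    (let wd := weekdayA [day]
     if day = 1 ∨ day = 2 ∨ day = 3 then acc ++ [1]
     else if PySem.List.pyGet? wd 0 = some "Monday" ∨ PySem.List.pyGet? wd 0 = some "Tuesday"
          ∨ PySem.List.pyGet? wd 0 = some "Wednesday" ∨ PySem.List.pyGet? wd 0 = some "Thursday" then acc ++ [0]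
     else acc ++ [1]) =
    acc ++ [if (decide (PySem.Int.mod (day - 3) 7 < 3) || decide (1 ≤ day ∧ day ≤ 3)) then (1 : Int) else 0] := by
  have hm : PySem.Int.mod day 7 = day % 7 := PySem.Int.mod_eq_emod_of_pos (by norm_num)
  have hm3 : PySem.Int.mod (day - 3) 7 = (day - 3) % 7 := PySem.Int.mod_eq_emod_of_pos (by norm_num)
  by_cases h123 : day = 1 ∨ day = 2 ∨ day = 3
  · have ho : (1 ≤ day ∧ day ≤ 3) := by omega
    simp [h123, ho]
  · have ho : ¬ (1 ≤ day ∧ day ≤ 3) := by omega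
    simp only [weekdayA, List.foldl_cons, List.foldl_nil, List.nil_append, h123, if_false,
      decide_eq_false ho, Bool.or_false, decide_eq_true_eq]
    rw [hm, hm3]
    have h7 : day % 7 = 0 ∨ day % 7 = 1 ∨ day % 7 = 2 ∨ day % 7 = 3 ∨ day % 7 = 4 ∨ day % 7 = 5 ∨ day % 7 = 6 := by omega
    rcases h7 with h|h|h|h|h|h|h
    · rw [show ((day - 3) % 7) = 4 from by omega]; simp [h, PySem.List.pyGet?, PySem.List.pyIdx?]
    · rw [show ((day - 3) % 7) = 5 from by omega]; simp [h, PySem.List.pyGet?, PySem.List.pyIdx?]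
    · rw [show ((day - 3) % 7) = 6 from by omega]; simp [h, PySem.List.pyGet?, PySem.List.pyIdx?]
    · rw [show ((day - 3) % 7) = 0 from by omega]; simp [h, PySem.List.pyGet?, PySem.List.pyIdx?]
    · rw [show ((day - 3) % 7) = 1 from by omega]; simp [h, PySem.List.pyGet?, PySem.List.pyIdx?]
    · rw [show ((day - 3) % 7) = 2 from by omega]; simp [h, PySem.List.pyGet?, PySem.List.pyIdx?]
    · rw [show ((day - 3) % 7) = 3 from by omega]; simp [h, PySem.List.pyGet?, PySem.List.pyIdx?]

theorem difficulty_foldl (days : List Int) (acc : List Int) :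
    days.foldl (fun dif day =>
      let wd := weekdayA [day]
      if day = 1 ∨ day = 2 ∨ day = 3 then dif ++ [1]
      else if PySem.List.pyGet? wd 0 = some "Monday" ∨ PySem.List.pyGet? wd 0 = some "Tuesday"
           ∨ PySem.List.pyGet? wd 0 = some "Wednesday" ∨ PySem.List.pyGet? wd 0 = some "Thursday" then dif ++ [0]
      else dif ++ [1]) acc
    = acc ++ difficulty_alt days := by
  induction days generalizing acc with
  | nil => simp [difficulty_alt]
  | cons d ds ih =>
      rw [List.foldl_cons, difficulty_step_eq acc d, ih, alt_eq_map, alt_eq_map]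
      simp

-- ===== VERDICT (by name: the statement is the Claim_ definition above) =====
theorem difficulty_spec : Claim_equal_difficulty := by
  intro days _
  unfold Spec_difficulty difficulty
  simpa using difficulty_foldl days []
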